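-- pv_equiv track=rewrite | github.com/kobisznn/Connect4_game | connect4.py | verify_board
-- ===== SOURCE A (Python) =====
-- def verify_board(board):
--     nrows = len(board)
--     ncols = len(board[1])
--     no_of_x = 0
--     no_of_o = 0
--     for i in range(nrows):
--         for j in range(ncols):
--             cell = board[i][j]
--             if cell == "X":
--                 no_of_x += 1
--                 if i < nrows - 1 and board[i + 1][j] == ".":
--                     return False
--             elif cell == "O":
--                 no_of_o += 1
--                 if i < nrows - 1 and board[i + 1][j] == ".":
--                     return False
--
--     return (no_of_x - no_of_o) <= 1
-- ===== SOURCE B (Python) =====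
-- def verify_board(board):
--     ncols = len(board[1])
--     no_of_x = 0
--     no_of_o = 0
--     for j in range(ncols):
--         col = [row[j] for row in board]
--         for upper, lower in zip(col, col[1:]):
--             if upper in ("X", "O") and lower == ".":
--                 return False
--         no_of_x += col.count("X")
--         no_of_o += col.count("O")
--     return (no_of_x - no_of_o) <= 1
-- ===== Notes on version B (the rewrite author's own statement) =====
-- stated objective: alternative
-- what changed: B traverses column-major: it extracts each column once, detects a floating piece by scanning adjacent pairs (zip) of the column, and totals pieces with list.count per column, instead of A's row-major nested index loops with a board[i+1][j] lookahead and running counters per cell.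
-- outside the precondition, e.g. on verify_board([['.', 'X'], ['.', '.'], []]): A returns False, B raises IndexError
import Mathlib
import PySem

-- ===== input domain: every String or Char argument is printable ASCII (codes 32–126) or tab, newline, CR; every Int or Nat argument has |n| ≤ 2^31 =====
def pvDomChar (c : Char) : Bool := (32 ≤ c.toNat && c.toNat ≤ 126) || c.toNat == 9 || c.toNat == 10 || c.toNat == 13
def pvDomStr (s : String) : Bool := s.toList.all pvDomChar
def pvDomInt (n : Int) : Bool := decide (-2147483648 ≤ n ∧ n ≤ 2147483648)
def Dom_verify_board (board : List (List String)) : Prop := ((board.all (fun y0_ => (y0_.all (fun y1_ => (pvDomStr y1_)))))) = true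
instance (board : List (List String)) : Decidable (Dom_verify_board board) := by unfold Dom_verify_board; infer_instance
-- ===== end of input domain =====

-- B re-implements verify_board column-major (column extraction + zip-pairs gravity check + per-column count) instead of A's row-major nested index loops with lookahead; equal return values on Pre_, equal cost.


-- ===== PORT A =====
-- inner loop: for j in range(ncols): …  (none = the 'return False' path)
def vbInnerA (board : List (List String)) (nrows ncols i j : Nat) (x o : Int) :
    Option (Int × Int) :=
  if _h : j < ncols then
    let cell := (board.getD i []).getD j ""
    if cell = "X" then
      if i < nrows - 1 ∧ (board.getD (i+1) []).getD j "" = "." then none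
      else vbInnerA board nrows ncols i (j+1) (x+1) o
    else if cell = "O" then
      if i < nrows - 1 ∧ (board.getD (i+1) []).getD j "" = "." then none
      else vbInnerA board nrows ncols i (j+1) x (o+1)
    else vbInnerA board nrows ncols i (j+1) x o
  else some (x, o)
termination_by ncols - j

-- outer loop: for i in range(nrows): …
def vbOuterA (board : List (List String)) (nrows ncols i : Nat) (x o : Int) : Bool :=
  if _h : i < nrows then
    match vbInnerA board nrows ncols i 0 x o with
    | none => false
    | some (x', o') => vbOuterA board nrows ncols (i+1) x' o'
  else decide (x - o ≤ 1)
termination_by nrows - i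

def verify_board (board : List (List String)) : Bool :=
  vbOuterA board board.length ((board.getD 1 []).length) 0 0 0

-- ===== PORT B =====
-- 'for upper, lower in zip(col, col[1:]): if upper in ("X","O") and lower == ".": return False'
def vbColViol (col : List String) : Bool :=
  (col.zip col.tail).any (fun p => (p.1 == "X" || p.1 == "O") && p.2 == ".")

-- 'for j in range(ncols): col = [row[j] for row in board]; …'
def vbAltGo (board : List (List String)) (ncols j : Nat) (x o : Int) : Bool :=
  if _h : j < ncols then
    let col := board.map (fun row => row.getD j "")
    if vbColViol col then false
    else vbAltGo board ncols (j+1) (x + PySem.List.count col "X") (o + PySem.List.count col "O")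
  else decide (x - o ≤ 1)
termination_by ncols - j

def verify_board_alt (board : List (List String)) : Bool :=
  vbAltGo board ((board.getD 1 []).length) 0 0 0

-- ===== PRECONDITION & SPEC =====
-- Pre_ excludes boards with fewer than 2 rows (board[1] raises IndexError) and ragged boards with
-- a row shorter than len(board[1]) (board[i][j] can raise IndexError; cite: on one such board A
-- happens to return False before reaching the short row while B's column order reaches it first).
def Pre_verify_board (board : List (List String)) : Prop :=
  2 ≤ board.length ∧ ∀ r ∈ board, (board.getD 1 []).length ≤ r.length
instance (board : List (List String)) : Decidable (Pre_verify_board board) := by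
  unfold Pre_verify_board; infer_instance

def pvWitness_verify_board : List (List String) := [[".", "."], ["X", "O"]]

def Spec_verify_board (board : List (List String)) (out : Bool) : Prop := out = verify_board_alt board
instance (board : List (List String)) (out : Bool) : Decidable (Spec_verify_board board out) := by
  unfold Spec_verify_board; infer_instance

-- ===== CLAIM (what is proved, stated in full; the proofs are below) =====
def Claim_equal_verify_board : Prop := ∀ (board : List (List String)), Dom_verify_board board → Pre_verify_board board → Spec_verify_board board (verify_board board)

-- ===== LEMMAS AND PROOFS =====

-- the cell A reads at (i, j), totalised the way the ports totalise indexing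
def vbCell (board : List (List String)) (i j : Nat) : String := (board.getD i []).getD j ""

-- the Bool that sends A's inner loop to 'return False' at (i, j)
def vbHit (board : List (List String)) (nrows i j : Nat) : Bool :=
  (vbCell board i j == "X" || vbCell board i j == "O")
    && decide (i < nrows - 1) && (vbCell board (i+1) j == ".")

def vbInd (s v : String) : Int := if s = v then 1 else 0

-- row i's contribution to the counters, over columns j, j+1, …, ncols-1
def vbRowSum (board : List (List String)) (i j ncols : Nat) (v : String) : Int :=
  ((List.range (ncols - j)).map (fun k => vbInd (vbCell board i (j + k)) v)).sum

lemma vbRowSum_stop (board : List (List String)) (i j ncols : Nat) (h : ¬ j < ncols) (v : String) :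
    vbRowSum board i j ncols v = 0 := by
  unfold vbRowSum
  have : ncols - j = 0 := by omega
  simp [this]

lemma vbRowSum_step (board : List (List String)) (i j ncols : Nat) (h : j < ncols) (v : String) :
    vbRowSum board i j ncols v = vbInd (vbCell board i j) v + vbRowSum board i (j+1) ncols v := by
  unfold vbRowSum
  have h1 : ncols - j = (ncols - (j+1)) + 1 := by omega
  rw [h1, List.range_succ_eq_map]
  simp [List.map_map, Function.comp_def, Nat.add_assoc, Nat.add_comm 1]

def vbRowHit (board : List (List String)) (nrows i j ncols : Nat) : Bool :=
  (List.range (ncols - j)).any (fun k => vbHit board nrows i (j + k))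

lemma vbRowHit_stop (board : List (List String)) (nrows i j ncols : Nat) (h : ¬ j < ncols) :
    vbRowHit board nrows i j ncols = false := by
  unfold vbRowHit
  have : ncols - j = 0 := by omega
  simp [this]

lemma vbRowHit_step (board : List (List String)) (nrows i j ncols : Nat) (h : j < ncols) :
    vbRowHit board nrows i j ncols
      = (vbHit board nrows i j || vbRowHit board nrows i (j+1) ncols) := by
  unfold vbRowHit
  have h1 : ncols - j = (ncols - (j+1)) + 1 := by omega
  rw [h1, List.range_succ_eq_map]
  simp [List.any_map, Function.comp_def, Nat.add_assoc, Nat.add_comm 1]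

-- characterisation of A's inner loop
lemma vbInnerA_eq (board : List (List String)) (nrows ncols i : Nat) :
    ∀ j x o, vbInnerA board nrows ncols i j x o
      = if vbRowHit board nrows i j ncols then none
        else some (x + vbRowSum board i j ncols "X", o + vbRowSum board i j ncols "O") := by
  intro j
  induction' hn : ncols - j with n ih generalizing j
  · intro x o
    have hj : ¬ j < ncols := by omega
    rw [vbInnerA, dif_neg hj, vbRowHit_stop _ _ _ _ _ hj,
      vbRowSum_stop _ _ _ _ hj, vbRowSum_stop _ _ _ _ hj]
    simp
  · intro x o
    have hj : j < ncols := by omega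
    have hn' : ncols - (j+1) = n := by omega
    have IH := ih (j+1) hn'
    rw [vbInnerA, dif_pos hj, vbRowHit_step _ _ _ _ _ hj,
      vbRowSum_step _ _ _ _ hj, vbRowSum_step _ _ _ _ hj]
    simp only [IH, vbHit, vbInd, vbCell]
    split_ifs <;> simp_all <;> ring_nf

-- characterisation of A's outer loop
def vbAllHit (board : List (List String)) (nrows i ncols : Nat) : Bool :=
  (List.range (nrows - i)).any (fun k => vbRowHit board nrows (i + k) 0 ncols)

def vbColSum (board : List (List String)) (nrows i ncols : Nat) (v : String) : Int :=
  ((List.range (nrows - i)).map (fun k => vbRowSum board (i + k) 0 ncols v)).sum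

lemma vbAllHit_stop (board : List (List String)) (nrows i ncols : Nat) (h : ¬ i < nrows) :
    vbAllHit board nrows i ncols = false := by
  unfold vbAllHit
  have : nrows - i = 0 := by omega
  simp [this]

lemma vbAllHit_step (board : List (List String)) (nrows i ncols : Nat) (h : i < nrows) :
    vbAllHit board nrows i ncols
      = (vbRowHit board nrows i 0 ncols || vbAllHit board nrows (i+1) ncols) := by
  unfold vbAllHit
  have h1 : nrows - i = (nrows - (i+1)) + 1 := by omega
  rw [h1, List.range_succ_eq_map]
  simp [List.any_map, Function.comp_def, Nat.add_assoc, Nat.add_comm 1]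

lemma vbColSum_stop (board : List (List String)) (nrows i ncols : Nat) (h : ¬ i < nrows)
    (v : String) : vbColSum board nrows i ncols v = 0 := by
  unfold vbColSum
  have : nrows - i = 0 := by omega
  simp [this]

lemma vbColSum_step (board : List (List String)) (nrows i ncols : Nat) (h : i < nrows)
    (v : String) : vbColSum board nrows i ncols v
      = vbRowSum board i 0 ncols v + vbColSum board nrows (i+1) ncols v := by
  unfold vbColSum
  have h1 : nrows - i = (nrows - (i+1)) + 1 := by omega
  rw [h1, List.range_succ_eq_map]
  simp [List.map_map, Function.comp_def, Nat.add_assoc, Nat.add_comm 1]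

lemma vbOuterA_eq (board : List (List String)) (nrows ncols : Nat) :
    ∀ i x o, vbOuterA board nrows ncols i x o
      = if vbAllHit board nrows i ncols then false
        else decide ((x + vbColSum board nrows i ncols "X")
                      - (o + vbColSum board nrows i ncols "O") ≤ 1) := by
  intro i
  induction' hn : nrows - i with n ih generalizing i
  · intro x o
    have hi : ¬ i < nrows := by omega
    rw [vbOuterA, dif_neg hi, vbAllHit_stop _ _ _ _ hi,
      vbColSum_stop _ _ _ _ hi, vbColSum_stop _ _ _ _ hi]
    simp
  · intro x o
    have hi : i < nrows := by omega
    have hn' : nrows - (i+1) = n := by omega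
    have IH := ih (i+1) hn'
    rw [vbOuterA, dif_pos hi, vbInnerA_eq, vbAllHit_step _ _ _ _ hi,
      vbColSum_step _ _ _ _ hi, vbColSum_step _ _ _ _ hi]
    by_cases hr : vbRowHit board nrows i 0 ncols
    · simp [hr]
    · have hr' : vbRowHit board nrows i 0 ncols = false := by simpa using hr
      rw [hr']
      simp only [Bool.false_or]
      show vbOuterA board nrows ncols (i+1) (x + vbRowSum board i 0 ncols "X")
          (o + vbRowSum board i 0 ncols "O") = _
      rw [IH]
      ring_nf

-- ===== characterisation of B's loop =====
def vbCol (board : List (List String)) (j : Nat) : List String :=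
  board.map (fun row => row.getD j "")

def vbAnyViol (board : List (List String)) (j ncols : Nat) : Bool :=
  (List.range (ncols - j)).any (fun k => vbColViol (vbCol board (j + k)))

def vbCntSum (board : List (List String)) (j ncols : Nat) (v : String) : Int :=
  ((List.range (ncols - j)).map (fun k => (PySem.List.count (vbCol board (j + k)) v : Int))).sum

lemma vbAnyViol_stop (board : List (List String)) (j ncols : Nat) (h : ¬ j < ncols) :
    vbAnyViol board j ncols = false := by
  unfold vbAnyViol
  have : ncols - j = 0 := by omega
  simp [this]

lemma vbAnyViol_step (board : List (List String)) (j ncols : Nat) (h : j < ncols) :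
    vbAnyViol board j ncols = (vbColViol (vbCol board j) || vbAnyViol board (j+1) ncols) := by
  unfold vbAnyViol
  have h1 : ncols - j = (ncols - (j+1)) + 1 := by omega
  rw [h1, List.range_succ_eq_map]
  simp [List.any_map, Function.comp_def, Nat.add_assoc, Nat.add_comm 1]

lemma vbCntSum_stop (board : List (List String)) (j ncols : Nat) (h : ¬ j < ncols) (v : String) :
    vbCntSum board j ncols v = 0 := by
  unfold vbCntSum
  have : ncols - j = 0 := by omega
  simp [this]

lemma vbCntSum_step (board : List (List String)) (j ncols : Nat) (h : j < ncols) (v : String) :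
    vbCntSum board j ncols v
      = (PySem.List.count (vbCol board j) v : Int) + vbCntSum board (j+1) ncols v := by
  unfold vbCntSum
  have h1 : ncols - j = (ncols - (j+1)) + 1 := by omega
  rw [h1, List.range_succ_eq_map]
  simp [List.map_map, Function.comp_def, Nat.add_assoc, Nat.add_comm 1]

lemma vbAltGo_eq (board : List (List String)) (ncols : Nat) :
    ∀ j x o, vbAltGo board ncols j x o
      = if vbAnyViol board j ncols then false
        else decide ((x + vbCntSum board j ncols "X") - (o + vbCntSum board j ncols "O") ≤ 1) := by
  intro j
  induction' hn : ncols - j with n ih generalizing j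
  · intro x o
    have hj : ¬ j < ncols := by omega
    rw [vbAltGo, dif_neg hj, vbAnyViol_stop _ _ _ hj,
      vbCntSum_stop _ _ _ hj, vbCntSum_stop _ _ _ hj]
    simp
  · intro x o
    have hj : j < ncols := by omega
    have hn' : ncols - (j+1) = n := by omega
    have IH := ih (j+1) hn'
    rw [vbAltGo]
    simp only [dif_pos hj]
    rw [vbAnyViol_step _ _ _ hj, vbCntSum_step _ _ _ hj, vbCntSum_step _ _ _ hj]
    by_cases hv : vbColViol (vbCol board j)
    · have hv2 := hv
      simp only [vbCol] at hv2
      rw [hv2, hv]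
      simp
    · have hv1 : vbColViol (vbCol board j) = false := by simpa using hv
      have hv2 := hv1
      simp only [vbCol] at hv2
      rw [hv2, hv1]
      simp only [Bool.false_or]
      show vbAltGo board ncols (j+1) _ _ = _
      rw [IH]
      simp only [vbCol]
      ring_nf

-- ===== bridges between the two characterisations =====
lemma vbCol_getD (board : List (List String)) :
    ∀ i j, (vbCol board j).getD i "" = vbCell board i j := by
  induction board with
  | nil => intro i j; simp [vbCol, vbCell]
  | cons r rest ih =>
      intro i j
      cases i with
      | zero => simp [vbCol, vbCell]
      | succ i' => simpa [vbCol, vbCell] using ih i' j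

lemma zip_any_idx (p : String → String → Bool) :
    ∀ l : List String,
      (l.zip l.tail).any (fun q => p q.1 q.2)
        = (List.range (l.length - 1)).any (fun i => p (l.getD i "") (l.getD (i+1) "")) := by
  intro l
  induction l with
  | nil => simp
  | cons a rest ih =>
      cases rest with
      | nil => simp
      | cons b t =>
          have : (a :: b :: t).length - 1 = t.length + 1 := by simp
          rw [this, List.range_succ_eq_map]
          simp only [List.any_cons, List.any_map, Function.comp_def, List.getD_cons_succ,
            List.getD_cons_zero]
          have ih' := ih
          simp only [List.length_cons, Nat.add_sub_cancel, List.getD_cons_succ] at ih'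
          rw [← ih']
          simp [List.zip]

lemma vbColViol_idx (board : List (List String)) (j : Nat) :
    vbColViol (vbCol board j)
      = (List.range (board.length - 1)).any (fun i => vbHit board board.length i j) := by
  unfold vbColViol
  rw [zip_any_idx (fun u l => (u == "X" || u == "O") && l == ".")]
  have hlen : (vbCol board j).length = board.length := by simp [vbCol]
  rw [hlen]
  rw [Bool.eq_iff_iff]
  simp only [List.any_eq_true, List.mem_range]
  constructor
  · rintro ⟨i, hi, hp⟩
    refine ⟨i, hi, ?_⟩
    simp only [vbHit, vbCol_getD] at hp ⊢
    simp only [Bool.and_eq_true, Bool.or_eq_true, beq_iff_eq, decide_eq_true_eq] at hp ⊢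
    exact ⟨⟨hp.1, by omega⟩, hp.2⟩
  · rintro ⟨i, hi, hp⟩
    refine ⟨i, hi, ?_⟩
    simp only [vbHit] at hp
    simp only [vbCol_getD]
    simp only [Bool.and_eq_true, Bool.or_eq_true, beq_iff_eq, decide_eq_true_eq] at hp ⊢
    exact ⟨hp.1.1, hp.2⟩

lemma count_idx (v : String) :
    ∀ l : List String,
      ((PySem.List.count l v : Int))
        = ((List.range l.length).map (fun i => vbInd (l.getD i "") v)).sum := by
  intro l
  induction l with
  | nil => simp [PySem.List.count_eq]
  | cons a t ih =>
      rw [PySem.List.count_eq] at ih ⊢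
      have hlen : (a :: t).length = t.length + 1 := by simp
      rw [hlen, List.range_succ_eq_map]
      simp only [List.map_cons, List.map_map, Function.comp_def, List.getD_cons_succ,
        List.getD_cons_zero, List.sum_cons]
      rw [← ih]
      by_cases hav : a = v
      · simp [hav, vbInd]
        ring
      · simp [hav, vbInd]

lemma hits_eq (board : List (List String)) (ncols : Nat) :
    vbAllHit board board.length 0 ncols = vbAnyViol board 0 ncols := by
  rw [Bool.eq_iff_iff]
  unfold vbAllHit vbAnyViol vbRowHit
  simp only [Nat.sub_zero, Nat.zero_add, List.any_eq_true, List.mem_range, vbColViol_idx]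
  constructor
  · rintro ⟨i, hi, j, hj, hp⟩
    have hi1 : i < board.length - 1 := by
      simp only [vbHit, Bool.and_eq_true, decide_eq_true_eq] at hp
      exact hp.1.2
    exact ⟨j, hj, i, hi1, hp⟩
  · rintro ⟨j, hj, i, hi, hp⟩
    exact ⟨i, by omega, j, hj, hp⟩

lemma sums_eq (board : List (List String)) (ncols : Nat) (v : String) :
    vbColSum board board.length 0 ncols v = vbCntSum board 0 ncols v := by
  unfold vbColSum vbCntSum vbRowSum
  simp only [Nat.sub_zero, Nat.zero_add]
  have hcnt : ∀ j, (PySem.List.count (vbCol board j) v : Int)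
      = ((List.range board.length).map (fun i => vbInd (vbCell board i j) v)).sum := by
    intro j
    rw [count_idx]
    have hlen : (vbCol board j).length = board.length := by simp [vbCol]
    rw [hlen]
    simp only [vbCol_getD]
  simp only [hcnt]
  have h1 : ∀ (n m : Nat) (g : Nat → Nat → Int),
      ((List.range n).map (fun i => ((List.range m).map (g i)).sum)).sum
        = ((List.range m).map (fun j => ((List.range n).map (fun i => g i j)).sum)).sum := by
    intro n m g
    have e1 : ∀ (k : Nat) (f : Nat → Int),
        ((List.range k).map f).sum = ∑ i ∈ Finset.range k, f i := by
      intro k f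
      rfl
    rw [e1, e1]
    simp only [e1]
    exact Finset.sum_comm
  exact h1 board.length ncols (fun i j => vbInd (vbCell board i j) v)

-- ===== VERDICT (by name: the statement is the Claim_ definition above) =====
theorem verify_board_spec : Claim_equal_verify_board := by
  intro board _ _
  unfold Spec_verify_board verify_board verify_board_alt
  rw [vbOuterA_eq, vbAltGo_eq, hits_eq, sums_eq, sums_eq]
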